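-- pv_equiv track=rewrite | github.com/tensorflow/models | official/nlp/data/create_pretraining_data.py | _tokens_to_grams
-- ===== SOURCE A (Python) =====
-- import collections
--
-- _Gram = collections.namedtuple("_Gram", ["begin", "end"])
--
-- def _tokens_to_grams(tokens):
--   """Reconstitue grams (words) from `tokens`.
--
--   E.g.,
--      tokens: ['[CLS]', 'That', 'lit', '##tle', 'blue', 'tru', '##ck', '[SEP]']
--       grams: [          [1,2), [2,         4),  [4,5) , [5,       6)]
--
--   Args:
--     tokens: list of tokens (word pieces or sentence pieces).
--
--   Returns:
--     List of _Grams representing spans of whole words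
--     (without "[CLS]" and "[SEP]").
--   """
--   grams = []
--   gram_start_pos = None
--   for i, token in enumerate(tokens):
--     if gram_start_pos is not None and token.startswith("##"):
--       continue
--     if gram_start_pos is not None:
--       grams.append(_Gram(gram_start_pos, i))
--     if token not in ["[CLS]", "[SEP]"]:
--       gram_start_pos = i
--     else:
--       gram_start_pos = None
--   if gram_start_pos is not None:
--     grams.append(_Gram(gram_start_pos, len(tokens)))
--   return grams
-- ===== SOURCE B (Python) =====
-- def _tokens_to_grams(tokens):
--   """Two-pass reconstruction: first collect the word boundaries (each word
--   start and each special token), then pair every word start with the next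
--   boundary.  A non-special token starts a word unless it is a continuation
--   piece ('##...') with a word directly before it to continue."""
--   specials = ("[CLS]", "[SEP]")
--   bounds = []  # (position, starts_a_word)
--   prev = None
--   for i, t in enumerate(tokens):
--     if t in specials:
--       bounds.append((i, False))
--     elif not t.startswith("##") or prev is None or prev in specials:
--       bounds.append((i, True))
--     prev = t
--   bounds.append((len(tokens), False))
--   return [(b, e) for (b, s), (e, _) in zip(bounds, bounds[1:]) if s]
-- ===== Notes on version B (the rewrite author's own statement) =====
-- stated objective: alternative
-- what changed: A's single stateful scan carrying an optional open-gram start is replaced by a two-pass decomposition: first collect the list of word boundaries (word starts and special tokens, plus the final length), then pair each word start with the next boundary.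
import Mathlib
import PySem

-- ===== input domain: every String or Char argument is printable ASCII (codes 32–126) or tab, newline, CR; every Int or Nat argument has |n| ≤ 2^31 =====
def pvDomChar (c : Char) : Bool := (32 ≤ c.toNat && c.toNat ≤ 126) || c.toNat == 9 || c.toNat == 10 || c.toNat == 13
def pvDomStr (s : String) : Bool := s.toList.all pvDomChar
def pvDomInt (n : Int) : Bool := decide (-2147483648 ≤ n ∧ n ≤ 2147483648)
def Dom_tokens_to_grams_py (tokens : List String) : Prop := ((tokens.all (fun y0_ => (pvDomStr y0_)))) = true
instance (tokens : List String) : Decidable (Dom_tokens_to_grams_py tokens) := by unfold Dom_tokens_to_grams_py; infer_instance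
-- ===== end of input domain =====

-- B replaces A's single stateful scan by a two-pass decomposition: collect the
-- word boundaries, then pair each word start with the next boundary
-- (objective: alternative decomposition, same cost).

-- ===== PORT A =====
-- one iteration of A's `for i, token in enumerate(tokens)` loop body
def pvAStep (s : List (Int × Int) × Option Int) (x : String × Nat) : List (Int × Int) × Option Int :=
  match s.2 with
  | some p =>
    if PySem.Str.startswith x.1 "##" then s            -- continue
    else
      let g := s.1 ++ [(p, (x.2 : Int))]               -- grams.append(_Gram(gram_start_pos, i))
      if x.1 ∈ ["[CLS]", "[SEP]"] then (g, none) else (g, some (x.2 : Int))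
  | none =>
    if x.1 ∈ ["[CLS]", "[SEP]"] then (s.1, none) else (s.1, some (x.2 : Int))

def tokens_to_grams_py (tokens : List String) : List (Int × Int) :=
  let r := tokens.zipIdx.foldl pvAStep ([], none)
  match r.2 with
  | some p => r.1 ++ [(p, (tokens.length : Int))]      -- trailing open gram
  | none => r.1

-- ===== PORT B =====
def pvIsSpecial (t : String) : Bool := t == "[CLS]" || t == "[SEP]"

-- one iteration of B's boundary-collecting pass; state = (bounds, prev token)
def pvBPass (s : List (Int × Bool) × Option String) (x : String × Nat) : List (Int × Bool) × Option String :=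
  if pvIsSpecial x.1 then (s.1 ++ [((x.2 : Int), false)], some x.1)
  else if !(PySem.Str.startswith x.1 "##") || s.2.isNone
          || (match s.2 with | some p => pvIsSpecial p | none => false) then
    (s.1 ++ [((x.2 : Int), true)], some x.1)
  else (s.1, some x.1)

def tokens_to_grams_py_alt (tokens : List String) : List (Int × Int) :=
  let bounds := (tokens.zipIdx.foldl pvBPass ([], none)).1 ++ [((tokens.length : Int), false)]
  -- [(b, e) for (b, s), (e, _) in zip(bounds, bounds[1:]) if s]
  ((bounds.zip bounds.tail).filter (fun p => p.1.2)).map (fun p => (p.1.1, p.2.1))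

-- ===== PRECONDITION & SPEC =====
def Spec_tokens_to_grams_py (tokens : List String) (out : List (Int × Int)) : Prop := out = tokens_to_grams_py_alt tokens
instance (tokens : List String) (out : List (Int × Int)) : Decidable (Spec_tokens_to_grams_py tokens out) := by unfold Spec_tokens_to_grams_py; infer_instance

-- ===== CLAIM (what is proved, stated in full; the proofs are below) =====
def Claim_equal_tokens_to_grams_py : Prop := ∀ (tokens : List String), Dom_tokens_to_grams_py tokens → Spec_tokens_to_grams_py tokens (tokens_to_grams_py tokens)

-- ===== LEMMAS AND PROOFS =====

-- A's loop as structural recursion: state = optional open-gram start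
def pvAGo (s : Option Int) (i : Nat) : List String → List (Int × Int)
  | [] => match s with | some p => [(p, (i : Int))] | none => []
  | t :: ts =>
    match s with
    | some p =>
      if PySem.Str.startswith t "##" then pvAGo (some p) (i+1) ts
      else if pvIsSpecial t then (p, (i : Int)) :: pvAGo none (i+1) ts
      else (p, (i : Int)) :: pvAGo (some (i : Int)) (i+1) ts
    | none =>
      if pvIsSpecial t then pvAGo none (i+1) ts else pvAGo (some (i : Int)) (i+1) ts

-- B's first pass as structural recursion; fr = "prev is None or prev special"
def pvBndR (fr : Bool) (i : Nat) : List String → List (Int × Bool)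
  | [] => []
  | t :: ts =>
    if pvIsSpecial t then ((i : Int), false) :: pvBndR true (i+1) ts
    else if !(PySem.Str.startswith t "##") || fr then ((i : Int), true) :: pvBndR false (i+1) ts
    else pvBndR false (i+1) ts

-- B's second pass as structural recursion over the boundary list
def pvEmit (n : Int) : List (Int × Bool) → List (Int × Int)
  | [] => []
  | (j, b) :: rest =>
    let e := match rest with | [] => n | (k, _) :: _ => k
    if b then (j, e) :: pvEmit n rest else pvEmit n rest

def pvFrOf (prev : Option String) : Bool :=
  match prev with | none => true | some p => pvIsSpecial p

def pvNbOf (n : Int) (l : List (Int × Bool)) : Int :=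
  match l with | [] => n | (k, _) :: _ => k

lemma pvMemSpec (t : String) : (t ∈ (["[CLS]", "[SEP]"] : List String)) ↔ pvIsSpecial t = true := by
  simp [pvIsSpecial]

lemma pvHashNotSpecial (t : String) (h : PySem.Chars.startswith t.toList ['#','#'] = true) :
    pvIsSpecial t = false := by
  cases hs : pvIsSpecial t
  · rfl
  · have : t = "[CLS]" ∨ t = "[SEP]" := by
      simpa [pvIsSpecial] using hs
    rcases this with rfl | rfl <;> exact absurd h (by decide)

lemma pvA_char : ∀ (ts : List String) (s : Option Int) (i : Nat) (acc : List (Int × Int)),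
    (let r := (ts.zipIdx i).foldl pvAStep (acc, s)
     r.1 ++ (match r.2 with | some p => [(p, ((i + ts.length : Nat) : Int))] | none => []))
      = acc ++ pvAGo s i ts := by
  intro ts
  induction ts with
  | nil =>
    intro s i acc
    cases s <;> simp [pvAGo]
  | cons t ts ih =>
    intro s i acc
    have hlen : i + (t :: ts).length = (i + 1) + ts.length := by simp; omega
    simp only [List.zipIdx_cons, List.foldl_cons, hlen]
    cases s with
    | none =>
      by_cases hsp : t ∈ (["[CLS]", "[SEP]"] : List String)
      · have hb := (pvMemSpec t).1 hsp
        simp only [pvAStep, if_pos hsp]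
        rw [ih none (i+1) acc]
        simp [pvAGo, hb]
      · have hb : pvIsSpecial t = false := by
          cases h : pvIsSpecial t
          · rfl
          · exact absurd ((pvMemSpec t).2 h) hsp
        simp only [pvAStep, if_neg hsp]
        rw [ih (some (i : Int)) (i+1) acc]
        simp [pvAGo, hb]
    | some p =>
      by_cases hh : PySem.Str.startswith t "##" = true
      · simp only [pvAStep, if_pos hh]
        rw [ih (some p) (i+1) acc]
        simp at hh
        simp [pvAGo, hh]
      · simp only [pvAStep, if_neg hh]
        simp at hh
        by_cases hsp : t ∈ (["[CLS]", "[SEP]"] : List String)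
        · have hb := (pvMemSpec t).1 hsp
          rw [if_pos hsp, ih none (i+1) (acc ++ [(p, (i : Int))])]
          simp [pvAGo, hh, hb]
        · have hb : pvIsSpecial t = false := by
            cases h : pvIsSpecial t
            · rfl
            · exact absurd ((pvMemSpec t).2 h) hsp
          rw [if_neg hsp, ih (some (i : Int)) (i+1) (acc ++ [(p, (i : Int))])]
          simp [pvAGo, hh, hb]

lemma pvA_eq_go (tokens : List String) :
    tokens_to_grams_py tokens = pvAGo none 0 tokens := by
  have h := pvA_char tokens none 0 []
  simp only [List.nil_append, Nat.zero_add] at h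
  unfold tokens_to_grams_py
  rw [← h]
  cases hr : ((tokens.zipIdx 0).foldl pvAStep ([], none)).2 <;> simp [hr]

-- the boundary-collecting fold equals its structural recursion
lemma pvB_fold : ∀ (ts : List String) (i : Nat) (acc : List (Int × Bool)) (prev : Option String),
    ((ts.zipIdx i).foldl pvBPass (acc, prev)).1 = acc ++ pvBndR (pvFrOf prev) i ts := by
  intro ts
  induction ts with
  | nil => intro i acc prev; simp [pvBndR]
  | cons t ts ih =>
    intro i acc prev
    simp only [List.zipIdx_cons, List.foldl_cons]
    have hcond : (!(PySem.Str.startswith t "##") || prev.isNone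
        || (match prev with | some p => pvIsSpecial p | none => false))
        = (!(PySem.Str.startswith t "##") || pvFrOf prev) := by
      cases prev <;> simp [pvFrOf]
    by_cases hsp : pvIsSpecial t = true
    · have hstep : pvBPass (acc, prev) (t, i) = (acc ++ [((i : Int), false)], some t) := by
        simp [pvBPass, hsp]
      rw [hstep, ih (i+1) (acc ++ [((i : Int), false)]) (some t)]
      simp [pvBndR, hsp, pvFrOf]
    · have hb : pvIsSpecial t = false := by cases h : pvIsSpecial t; rfl; exact absurd h hsp
      by_cases hc : (!(PySem.Str.startswith t "##") || pvFrOf prev) = true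
      · have hstep : pvBPass (acc, prev) (t, i) = (acc ++ [((i : Int), true)], some t) := by
          simp only [pvBPass, hb, Bool.false_eq_true, if_false, hcond, hc, if_true]
        rw [hstep, ih (i+1) (acc ++ [((i : Int), true)]) (some t)]
        have hbnd : pvBndR (pvFrOf prev) i (t :: ts) = ((i : Int), true) :: pvBndR false (i+1) ts := by
          simp only [pvBndR]
          rw [if_neg (by simp [hb]), if_pos hc]
        rw [hbnd]
        simp [pvFrOf, hb]
      · have hc' : (!(PySem.Str.startswith t "##") || pvFrOf prev) = false := by
          cases h : (!(PySem.Str.startswith t "##") || pvFrOf prev); rfl; exact absurd h hc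
        have hstep : pvBPass (acc, prev) (t, i) = (acc, some t) := by
          simp only [pvBPass, hb, Bool.false_eq_true, if_false, hcond, hc']
        rw [hstep, ih (i+1) acc (some t)]
        have hbnd : pvBndR (pvFrOf prev) i (t :: ts) = pvBndR false (i+1) ts := by
          simp only [pvBndR]
          rw [if_neg (by simp [hb]), if_neg (by rw [hc']; exact Bool.false_ne_true)]
        rw [hbnd]
        simp [pvFrOf, hb]

-- the zip/filter/map pairing equals pvEmit
lemma pvB_pair : ∀ (bs : List (Int × Bool)) (n : Int),
    (((bs ++ [(n, false)]).zip (bs ++ [(n, false)]).tail).filter (fun p => p.1.2)).map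
        (fun p => (p.1.1, p.2.1)) = pvEmit n bs := by
  intro bs
  induction bs with
  | nil => intro n; simp [pvEmit]
  | cons x rest ih =>
    intro n
    obtain ⟨j, b⟩ := x
    cases rest with
    | nil =>
      cases b <;> simp [pvEmit]
    | cons y rs =>
      have := ih n
      simp only [List.cons_append, List.tail_cons, List.zip_cons_cons, List.filter_cons] at *
      cases b
      · simpa [pvEmit] using this
      · simp only [pvEmit]
        obtain ⟨k, c⟩ := y
        simpa using this

lemma pvB_eq_go (tokens : List String) :
    tokens_to_grams_py_alt tokens = pvEmit (tokens.length : Int) (pvBndR true 0 tokens) := by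
  unfold tokens_to_grams_py_alt
  rw [pvB_fold tokens 0 [] none]
  simp only [List.nil_append, pvFrOf]
  exact pvB_pair (pvBndR true 0 tokens) (tokens.length : Int)

-- main: A's scan equals B's emit-over-boundaries, jointly for both states
lemma pvMain : ∀ (ts : List String) (i : Nat) (n : Int), n = ((i + ts.length : Nat) : Int) →
    (pvAGo none i ts = pvEmit n (pvBndR true i ts)) ∧
    (∀ p : Int, pvAGo (some p) i ts
        = (p, pvNbOf n (pvBndR false i ts)) :: pvEmit n (pvBndR false i ts)) := by
  intro ts
  induction ts with
  | nil =>
    intro i n hn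
    constructor
    · simp [pvAGo, pvBndR, pvEmit]
    · intro p; simp [pvAGo, pvBndR, pvEmit, pvNbOf, hn]
  | cons t ts ih =>
    intro i n hn
    have hn' : n = (((i+1) + ts.length : Nat) : Int) := by rw [hn]; congr 1; simp; omega
    by_cases hsp : pvIsSpecial t = true
    · have hh : PySem.Chars.startswith t.toList ['#','#'] = false := by
        cases h : PySem.Chars.startswith t.toList ['#','#']
        · rfl
        · exact absurd (pvHashNotSpecial t h) (by simp [hsp])
      constructor
      · simp [pvAGo, pvBndR, pvEmit, hsp, (ih (i+1) n hn').1]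
      · intro p
        simp [pvAGo, pvBndR, pvEmit, pvNbOf, hsp, hh, (ih (i+1) n hn').1]
    · have hb : pvIsSpecial t = false := by cases h : pvIsSpecial t; rfl; exact absurd h hsp
      constructor
      · -- fr = true: any non-special token starts a word
        have hB : pvBndR true i (t :: ts) = ((i : Int), true) :: pvBndR false (i+1) ts := by
          simp [pvBndR, hb]
        rw [hB]
        have hE : pvEmit n (((i : Int), true) :: pvBndR false (i+1) ts)
            = ((i : Int), pvNbOf n (pvBndR false (i+1) ts)) :: pvEmit n (pvBndR false (i+1) ts) := by
          cases h : pvBndR false (i+1) ts <;> simp [pvEmit, pvNbOf]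
        rw [hE, ← (ih (i+1) n hn').2 (i : Int)]
        simp [pvAGo, hb]
      · intro p
        by_cases hh : PySem.Chars.startswith t.toList ['#','#'] = true
        · -- continuation piece: no boundary, gram stays open
          have hB : pvBndR false i (t :: ts) = pvBndR false (i+1) ts := by
            simp [pvBndR, hb, hh]
          rw [hB, ← (ih (i+1) n hn').2 p]
          simp [pvAGo, hh]
        · have hh' : PySem.Chars.startswith t.toList ['#','#'] = false := by
            cases h : PySem.Chars.startswith t.toList ['#','#']; rfl; exact absurd h hh
          have hB : pvBndR false i (t :: ts) = ((i : Int), true) :: pvBndR false (i+1) ts := by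
            simp [pvBndR, hb, hh']
          rw [hB]
          have hE : pvEmit n (((i : Int), true) :: pvBndR false (i+1) ts)
              = ((i : Int), pvNbOf n (pvBndR false (i+1) ts)) :: pvEmit n (pvBndR false (i+1) ts) := by
            cases h : pvBndR false (i+1) ts <;> simp [pvEmit, pvNbOf]
          rw [hE, ← (ih (i+1) n hn').2 (i : Int)]
          simp [pvAGo, pvNbOf, hb, hh']

-- ===== VERDICT (by name: the statement is the Claim_ definition above) =====
theorem tokens_to_grams_py_spec : Claim_equal_tokens_to_grams_py := by
  intro tokens _
  unfold Spec_tokens_to_grams_py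
  rw [pvA_eq_go, pvB_eq_go, (pvMain tokens 0 (tokens.length : Int) (by simp)).1]
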